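-- pv_equiv track=rewrite | github.com/Snowyq/prg-basics | 04-Functions/functions-6.28.py | f
-- ===== SOURCE A (Python) =====
-- def f(roll):
--   most = "0"
--   for i in range(1,7):
--     curr = roll.count(str(i))
--     most_roll = roll.count(most)
--     if curr > most_roll:
--       most = str(i)
--   return most
-- ===== SOURCE B (Python) =====
-- def f(roll):
--   faces = sorted(ch for ch in roll if ch in "123456")
--   best = "0"
--   best_len = sum(1 for ch in roll if ch == "0")
--   run_ch, run_len = None, 0
--   for ch in faces:
--     if ch == run_ch:
--       run_len += 1
--     else:
--       run_ch, run_len = ch, 1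
--     if run_len > best_len:
--       best, best_len = run_ch, run_len
--   return best
-- ===== Notes on version B (the rewrite author's own statement) =====
-- stated objective: alternative
-- what changed: Replaces A's count-and-compare loop over the six faces (twelve full-string scans) with a sort-then-scan mode computation: filter the face characters, sort them, and find the longest run in one linear scan (ascending order and strict > reproduce A's smallest-face tie-break and the '0'-count seed).
import Mathlib
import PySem

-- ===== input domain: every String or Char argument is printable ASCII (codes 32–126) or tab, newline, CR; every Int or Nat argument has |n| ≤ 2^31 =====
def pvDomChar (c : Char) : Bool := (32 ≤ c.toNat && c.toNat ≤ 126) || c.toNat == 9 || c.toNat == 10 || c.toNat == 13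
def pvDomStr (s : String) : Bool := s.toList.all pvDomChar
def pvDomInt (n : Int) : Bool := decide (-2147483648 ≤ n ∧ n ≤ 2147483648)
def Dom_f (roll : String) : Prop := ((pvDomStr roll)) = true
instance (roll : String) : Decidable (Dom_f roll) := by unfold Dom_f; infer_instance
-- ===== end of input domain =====

-- B replaces A's per-face count-and-compare loop by sort-then-scan: sort the face
-- characters and find the longest run in one pass (alternative algorithm; no speed claim).

-- ===== PORT A =====
def f (roll : String) : String :=
  (PySem.List.pyRange 1 7 1).foldl (fun most i =>
    let curr := PySem.Str.count roll (PySem.Int.toStr i)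
    let most_roll := PySem.Str.count roll most
    if curr > most_roll then PySem.Int.toStr i else most) "0"

-- ===== PORT B =====
-- one step of Source B's run-scan loop; state = (best, best_len, run_ch, run_len),
-- Python's run_ch "" / "d" is ported as none / some 'd'
def scanStep (s : Char × Int × Option Char × Int) (ch : Char) : Char × Int × Option Char × Int :=
  let runLen : Int := if some ch = s.2.2.1 then s.2.2.2 + 1 else 1
  if runLen > s.2.1 then (ch, runLen, some ch, runLen) else (s.1, s.2.1, some ch, runLen)

def f_alt (roll : String) : String :=
  let faces := PySem.List.sorted (roll.toList.filter (fun ch => ch ∈ "123456".toList)) (fun x => x) false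
  let bestLen0 : Int := roll.toList.foldl (fun n ch => if ch == '0' then n + 1 else n) 0
  let st := faces.foldl scanStep ('0', bestLen0, none, 0)
  String.ofList [st.1]

-- ===== PRECONDITION & SPEC =====
def Spec_f (roll : String) (out : String) : Prop := out = f_alt roll
instance (roll : String) (out : String) : Decidable (Spec_f roll out) := by unfold Spec_f; infer_instance

-- ===== CLAIM (what is proved, stated in full; the proofs are below) =====
def Claim_equal_f : Prop := ∀ (roll : String), Dom_f roll → Spec_f roll (f roll)

-- ===== LEMMAS AND PROOFS =====

-- A's selection step over the character counts of cs
def astep (cs : List Char) (most c : Char) : Char :=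
  if cs.count c > cs.count most then c else most

-- Chars.count with a single-character needle is plain list count
lemma count_go_singleton (c : Char) : ∀ (l : List Char) (fuel acc : Nat), l.length ≤ fuel →
    PySem.Chars.count.go [c] fuel l acc = acc + l.count c := by
  intro l
  induction l with
  | nil => intro fuel acc _; cases fuel <;> simp [PySem.Chars.count.go]
  | cons h t ih =>
    intro fuel acc hle
    cases fuel with
    | zero => simp at hle
    | succ fuel =>
      have ht : t.length ≤ fuel := by simpa using hle
      by_cases hc : c = h
      · subst hc
        have hpre : [c].isPrefixOf (c :: t) = true := by simp [List.isPrefixOf]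
        simp [PySem.Chars.count.go, hpre, ih fuel (acc + 1) ht]
        omega
      · have hpre : [c].isPrefixOf (h :: t) = false := by
          simp [List.isPrefixOf, hc]
        simp [PySem.Chars.count.go, hpre, ih fuel acc ht, Ne.symm hc]

lemma count_singleton (cs : List Char) (c : Char) :
    PySem.Chars.count cs [c] = cs.count c := by
  simpa using count_go_singleton c cs cs.length 0 le_rfl

-- A's fold over singleton strings mirrors the astep fold over characters
lemma fold_map (cs : List Char) : ∀ (l : List Char) (m : Char),
    (l.map (fun c => String.ofList [c])).foldl
      (fun most s => if PySem.Chars.count cs s.toList > PySem.Chars.count cs most.toList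
                     then s else most) (String.ofList [m])
    = String.ofList [l.foldl (astep cs) m] := by
  intro l
  induction l with
  | nil => intro m; simp
  | cons c t ih =>
    intro m
    simp only [List.map_cons, List.foldl_cons, String.toList_ofList, count_singleton]
    rw [← apply_ite (fun c => String.ofList [c])]
    exact ih _

-- run-scan through the tail of a run of d: started inside the run (run_ch = d, run_len = m ≤ best_len)
lemma scan_replicate : ∀ (k : Nat) (d best : Char) (b m : Int), m ≤ b →
    (List.replicate k d).foldl scanStep (best, b, some d, m)
      = ((if m + k > b then d else best), max b (m + k), some d, m + k) := by
  intro k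
  induction k with
  | zero =>
    intro d best b m hm
    simp only [List.replicate, List.foldl_nil, Nat.cast_zero, add_zero]
    rw [if_neg (by omega), max_eq_left hm]
  | succ k ih =>
    intro d best b m hm
    rw [List.replicate_succ, List.foldl_cons]
    have hstep : scanStep (best, b, some d, m) d
        = if m + 1 > b then (d, m + 1, some d, m + 1) else (best, b, some d, m + 1) := by
      unfold scanStep
      simp
    rw [hstep]
    by_cases h : m + 1 > b
    · rw [if_pos h, ih d d (m + 1) (m + 1) le_rfl, ite_self]
      simp only [Prod.mk.injEq]
      refine ⟨by rw [if_pos (by push_cast; omega)], by push_cast; omega, trivial, by push_cast; ring⟩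
    · rw [if_neg h, ih d best b (m + 1) (by omega)]
      have h2 : m + 1 + (k : Int) = m + ((k + 1 : Nat) : Int) := by push_cast; ring
      rw [h2]

-- composite effect of one whole sorted run per face: the scan over the concatenated runs
-- computes A's astep fold, provided best_len = count(best) and run_ch is none of the faces
lemma scan_runs : ∀ (ds cs : List Char) (best : Char) (r : Option Char) (m : Int),
    ds.Nodup → (∀ d ∈ ds, r ≠ some d) →
    (ds.map (fun d => List.replicate (cs.count d) d)).flatten.foldl scanStep
        (best, (cs.count best : Int), r, m)
      = (ds.foldl (astep cs) best, (cs.count (ds.foldl (astep cs) best) : Int),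
         ds.foldl (fun (p : Option Char × Int) d =>
           if cs.count d = 0 then p else (some d, (cs.count d : Int))) (r, m)) := by
  intro ds
  induction ds with
  | nil => intro cs best r m _ _; simp
  | cons d rest ih =>
    intro cs best r m hnd hr
    have hdrest : d ∉ rest := (List.nodup_cons.mp hnd).1
    have hnd' : rest.Nodup := (List.nodup_cons.mp hnd).2
    have hrest : ∀ e ∈ rest, (some d : Option Char) ≠ some e :=
      fun e he heq => hdrest (by cases heq; exact he)
    rw [List.map_cons, List.flatten_cons, List.foldl_append]
    simp only [List.foldl_cons]
    rcases hc : cs.count d with _ | k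
    · -- empty run: state unchanged, astep keeps best
      have ha : astep cs best d = best := by
        unfold astep; rw [hc, if_neg (by omega)]
      simp only [List.replicate, List.foldl_nil, ha]
      exact ih cs best r m hnd' (fun e he => hr e (List.mem_cons_of_mem d he))
    · -- nonempty run: first char starts the run, scan_replicate finishes it
      rw [List.replicate_succ, List.foldl_cons]
      have hrun : (if some d = r then (m:Int) + 1 else 1) = 1 :=
        if_neg (fun hh => hr d List.mem_cons_self hh.symm)
      have hstep : scanStep (best, ((cs.count best : Nat) : Int), r, m) d
          = if (1 : Int) > (cs.count best : Int) then (d, 1, some d, 1)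
            else (best, ((cs.count best : Nat) : Int), some d, 1) := by
        unfold scanStep
        simp only [hrun]
      rw [hstep, if_neg (Nat.succ_ne_zero k)]
      by_cases hb : (1 : Int) > (cs.count best : Int)
      · have h0 : cs.count best = 0 := by omega
        have ha : astep cs best d = d := by
          unfold astep; rw [hc, h0, if_pos (Nat.succ_pos k)]
        rw [if_pos hb, scan_replicate k d d 1 1 le_rfl, ite_self, ha]
        have hmax : (max (1:Int) (1 + (k:Int)), some d, (1:Int) + (k:Int))
            = (((k + 1 : Nat) : Int), some d, ((k + 1 : Nat) : Int)) := by
          simp only [Prod.mk.injEq]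
          refine ⟨by push_cast; omega, trivial, by push_cast; ring⟩
        rw [Prod.mk.injEq, Prod.mk.injEq] at hmax
        rw [hmax.1, hmax.2.2]
        have hih := ih cs d (some d) ((k + 1 : Nat) : Int) hnd' hrest
        rw [hc] at hih
        exact hih
      · rw [if_neg hb, scan_replicate k d best ((cs.count best : Nat) : Int) 1 (by omega)]
        have ha : astep cs best d = if ((k + 1 : Nat) : Int) > ((cs.count best : Nat) : Int) then d else best := by
          unfold astep; rw [hc]; split_ifs with h1 h2 h2 <;>
            first | rfl | (exfalso; push_cast at h1 h2 ⊢; omega)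
        have hst : (max ((cs.count best : Nat) : Int) (1 + (k:Int)), some d, (1:Int) + (k:Int))
            = (((cs.count (astep cs best d) : Nat) : Int), some d, ((k + 1 : Nat) : Int)) := by
          rw [ha]; simp only [Prod.mk.injEq]
          refine ⟨?_, trivial, by push_cast; ring⟩
          split_ifs with h1
          · rw [hc]; push_cast; omega
          · push_cast at h1; omega
        rw [Prod.mk.injEq, Prod.mk.injEq] at hst
        rw [hst.1, hst.2.2, ← ha]
        exact ih cs (astep cs best d) (some d) ((k + 1 : Nat) : Int) hnd' hrest

-- count of any character in the concatenation of one run per distinct face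
lemma count_flatten_runs (cs : List Char) : ∀ (ds : List Char), ds.Nodup → ∀ a : Char,
    ((ds.map (fun d => List.replicate (cs.count d) d)).flatten).count a
      = if a ∈ ds then cs.count a else 0 := by
  intro ds
  induction ds with
  | nil => intro _ a; simp
  | cons d rest ih =>
    intro hnd a
    have hdrest : d ∉ rest := (List.nodup_cons.mp hnd).1
    rw [List.map_cons, List.flatten_cons, List.count_append, List.count_replicate,
        ih (List.nodup_cons.mp hnd).2 a]
    by_cases hda : d = a
    · subst hda
      rw [if_pos (by simp), if_pos List.mem_cons_self, if_neg (by simpa using hdrest)]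
      omega
    · rw [if_neg (by simpa using hda), zero_add]
      by_cases har : a ∈ rest
      · rw [if_pos har, if_pos (List.mem_cons_of_mem d har)]
      · rw [if_neg har, if_neg (by simp [har, Ne.symm hda])]

-- sorted(filter faces) is the concatenation of one run per face, in ascending face order
lemma faces_eq (cs : List Char) :
    PySem.List.sorted (cs.filter (fun ch => ch ∈ "123456".toList)) (fun x => x) false
      = ("123456".toList.map (fun d => List.replicate (cs.count d) d)).flatten := by
  apply PySem.List.sorted_id_eq_of_perm_of_pairwise
  · rw [List.perm_iff_count]
    intro a
    rw [count_flatten_runs cs "123456".toList (by decide) a]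
    by_cases ha : a ∈ "123456".toList
    · rw [if_pos ha, List.count_filter (by simpa using ha)]
    · rw [if_neg ha]
      exact (List.count_eq_zero.mpr
        (fun hmem => ha (by simpa using (List.mem_filter.mp hmem).2))).symm
  · rw [List.pairwise_flatten]
    constructor
    · intro l hl
      obtain ⟨x, _, rfl⟩ := List.mem_map.mp hl
      exact List.pairwise_replicate.mpr (Or.inr le_rfl)
    · rw [List.pairwise_map]
      refine List.Pairwise.imp ?_ (show ("123456".toList).Pairwise (· ≤ ·) by decide)
      intro a b hab x hx y hy
      rw [List.eq_of_mem_replicate hx, List.eq_of_mem_replicate hy]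
      exact hab

-- ===== VERDICT (by name: the statement is the Claim_ definition above) =====
theorem f_spec : Claim_equal_f := by
  intro roll _
  unfold Spec_f f f_alt
  have hA : (PySem.List.pyRange 1 7 1).foldl (fun most i =>
      let curr := PySem.Str.count roll (PySem.Int.toStr i)
      let most_roll := PySem.Str.count roll most
      if curr > most_roll then PySem.Int.toStr i else most) "0"
      = (("123456".toList).map (fun c => String.ofList [c])).foldl
        (fun most s => if PySem.Chars.count roll.toList s.toList >
            PySem.Chars.count roll.toList most.toList then s else most) (String.ofList ['0']) := rfl
  rw [hA, fold_map]
  have hz : roll.toList.foldl (fun n ch => if ch == '0' then n + 1 else n) (0 : Int)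
      = ((roll.toList.count '0' : Nat) : Int) := by
    rw [PySem.List.foldl_count_if (fun ch => ch == '0') roll.toList 0, zero_add, List.count]
  show String.ofList [List.foldl (astep roll.toList) '0' "123456".toList]
      = String.ofList [((PySem.List.sorted (roll.toList.filter (fun ch => ch ∈ "123456".toList))
            (fun x => x) false).foldl scanStep
          ('0', roll.toList.foldl (fun n ch => if ch == '0' then n + 1 else n) (0:Int), none, 0)).1]
  rw [faces_eq, hz,
      scan_runs "123456".toList roll.toList '0' none 0 (by decide) (by simp)]
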